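-- pv_equiv track=rewrite | github.com/gregory-dev/dynagram | grammar/methods/gengrammar.py | replaceDTMFStatic
-- ===== SOURCE A (Python) =====
-- def checkDTMFNum(character):
--   retChar = ''
--   if character == 'a' or character == 'b' or character == 'c':
--     retChar = ' dtmf-2 '
--
--   if character == 'd' or character == 'e' or character == 'f':
--     retChar = ' dtmf-3 '
--
--   if character == 'g' or character == 'h' or character == 'i':
--     retChar = ' dtmf-4 '
--
--   if character == 'j' or character == 'k' or character == 'l':
--     retChar = ' dtmf-5 '
--
--   if character == 'm' or character == 'n' or character == 'o':
--     retChar = ' dtmf-6 '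
--
--   if character == 'p' or character == 'q' or character == 'r' or character == 's':
--     retChar = ' dtmf-7 '
--
--   if character == 't' or character == 'u' or character == 'v':
--     retChar = ' dtmf-8 '
--
--   if character == 'w' or character == 'x' or character == 'y' or character == 'z':
--     retChar = ' dtmf-9 '
--
--   if character == '0':
--     retChar = ' dtmf-0 '
--
--   if character == '1':
--     retChar = ' dtmf-1 '
--
--   if character == '2':
--     retChar = ' dtmf-2 '
--
--   if character == '3':
--     retChar = ' dtmf-3 '
--
--   if character == '4':
--     retChar = ' dtmf-4 '
--
--   if character == '5':
--     retChar = ' dtmf-5 '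
--
--   if character == '6':
--     retChar = ' dtmf-6 '
--
--   if character == '7':
--     retChar = ' dtmf-7 '
--
--   if character == '8':
--     retChar = ' dtmf-8 '
--
--   if character == '9':
--     retChar = ' dtmf-9 '
--
--   if character == '@':
--     retChar = ' dtmf-@ '
--
--   if character == '*':
--     retChar = ' dtmf-* '
--
--   if character == '_':
--     retChar = ' dtmf-_ '
--
--   if character == '#':
--     retChar = ' dtmf-# '
--
--   if character == '.':
--     retChar = ' dtmf-. '
--
--   return retChar
--
-- def replaceDTMFStatic(pattern, language):
--   buildPatval = ''
--   retval = ''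
--   changePattern = pattern
--   removeChars = "(){}"
--
--   for rChar in removeChars:
--     changePattern = changePattern.replace(rChar,"")
--
--   for locPattern in changePattern.split(' '):
--     for locChar in locPattern:
--       retval = retval + ' ' + checkDTMFNum(locChar) + ' '
--       buildPatval = buildPatval + locChar
--
--   return retval, buildPatval
-- ===== SOURCE B (Python) =====
-- def replaceDTMFStatic(pattern, language):
--   kept = [c for c in pattern if c not in '(){} ']
--   parts = []
--   for c in kept:
--     o = ord(c)
--     if 97 <= o <= 122:
--       # phone-keypad digit by arithmetic: groups of 3, with s and z absorbed
--       i = o - 97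
--       tok = ' dtmf-%d ' % (2 + (i - (i >= 18) - (i >= 25)) // 3)
--     elif 48 <= o <= 57 or c in '@*_#.':
--       tok = ' dtmf-' + c + ' '
--     else:
--       tok = ''
--     parts.append(' ' + tok + ' ')
--   return ''.join(parts), ''.join(kept)
-- ===== Notes on version B (the rewrite author's own statement) =====
-- stated objective: faster
-- what changed: Replaces the strip-'(){}'-via-repeated-replace, split-on-space and nested segment loop with quadratic string concatenation, plus the 41-branch if-chain character table, by one filter pass producing the kept characters (which directly yield the second output) and a closed-form arithmetic keypad formula (digit = 2 + adjusted (ord(c)-97)//3) computing each letter's DTMF digit instead of enumerating cases, joined in O(n).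
import Mathlib
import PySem

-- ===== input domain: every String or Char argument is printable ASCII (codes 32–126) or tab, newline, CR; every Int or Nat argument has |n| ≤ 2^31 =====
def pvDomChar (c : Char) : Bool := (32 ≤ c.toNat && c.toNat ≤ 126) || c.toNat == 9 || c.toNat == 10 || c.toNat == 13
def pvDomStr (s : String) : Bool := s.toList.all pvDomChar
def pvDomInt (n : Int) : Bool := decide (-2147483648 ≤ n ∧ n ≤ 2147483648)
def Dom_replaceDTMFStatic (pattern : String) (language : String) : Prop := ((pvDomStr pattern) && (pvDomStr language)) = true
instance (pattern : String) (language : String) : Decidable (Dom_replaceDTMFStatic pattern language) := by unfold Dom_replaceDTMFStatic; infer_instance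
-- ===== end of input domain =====

-- B replaces A's strip-then-split-then-nested-loop (with O(n^2) string concatenation) and its
-- 41-branch character table by one filter pass plus an arithmetic keypad formula per letter,
-- joined in O(n) (objective: faster).

-- ===== PORT A =====
-- chain of ifs over a 'retChar' accumulator, exactly as in Python (strings handled as List Char)
def checkDTMFNum (character : Char) : List Char :=
  let retChar : List Char := []
  let retChar := if character = 'a' ∨ character = 'b' ∨ character = 'c' then " dtmf-2 ".toList else retChar
  let retChar := if character = 'd' ∨ character = 'e' ∨ character = 'f' then " dtmf-3 ".toList else retChar
  let retChar := if character = 'g' ∨ character = 'h' ∨ character = 'i' then " dtmf-4 ".toList else retChar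
  let retChar := if character = 'j' ∨ character = 'k' ∨ character = 'l' then " dtmf-5 ".toList else retChar
  let retChar := if character = 'm' ∨ character = 'n' ∨ character = 'o' then " dtmf-6 ".toList else retChar
  let retChar := if character = 'p' ∨ character = 'q' ∨ character = 'r' ∨ character = 's' then " dtmf-7 ".toList else retChar
  let retChar := if character = 't' ∨ character = 'u' ∨ character = 'v' then " dtmf-8 ".toList else retChar
  let retChar := if character = 'w' ∨ character = 'x' ∨ character = 'y' ∨ character = 'z' then " dtmf-9 ".toList else retChar
  let retChar := if character = '0' then " dtmf-0 ".toList else retChar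
  let retChar := if character = '1' then " dtmf-1 ".toList else retChar
  let retChar := if character = '2' then " dtmf-2 ".toList else retChar
  let retChar := if character = '3' then " dtmf-3 ".toList else retChar
  let retChar := if character = '4' then " dtmf-4 ".toList else retChar
  let retChar := if character = '5' then " dtmf-5 ".toList else retChar
  let retChar := if character = '6' then " dtmf-6 ".toList else retChar
  let retChar := if character = '7' then " dtmf-7 ".toList else retChar
  let retChar := if character = '8' then " dtmf-8 ".toList else retChar
  let retChar := if character = '9' then " dtmf-9 ".toList else retChar
  let retChar := if character = '@' then " dtmf-@ ".toList else retChar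
  let retChar := if character = '*' then " dtmf-* ".toList else retChar
  let retChar := if character = '_' then " dtmf-_ ".toList else retChar
  let retChar := if character = '#' then " dtmf-# ".toList else retChar
  let retChar := if character = '.' then " dtmf-. ".toList else retChar
  retChar

def replaceDTMFStatic (pattern : String) (language : String) : String × String :=
  let buildPatval : List Char := []
  let retval : List Char := []
  let changePattern := pattern.toList
  let removeChars := "(){}".toList
  let changePattern := removeChars.foldl (fun cp rChar => PySem.Chars.replace cp [rChar] []) changePattern
  let (retval, buildPatval) :=
    (PySem.Chars.splitOn changePattern [' ']).foldl
      (fun (s : List Char × List Char) locPattern =>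
        locPattern.foldl
          (fun (s : List Char × List Char) locChar =>
            (s.1 ++ [' '] ++ checkDTMFNum locChar ++ [' '], s.2 ++ [locChar])) s)
      (retval, buildPatval)
  (String.ofList retval, String.ofList buildPatval)

-- ===== PORT B =====
-- Source B's per-character token: letters get their keypad digit by arithmetic
-- (digit = 2 + adjusted (ord(c)-97)//3), digits and '@*_#.' pass through, others ''
def dtmfToken (c : Char) : List Char :=
  let o := c.toNat
  if 97 ≤ o ∧ o ≤ 122 then
    let i := o - 97
    let d := 2 + (i - (if 18 ≤ i then 1 else 0) - (if 25 ≤ i then 1 else 0)) / 3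
    " dtmf-".toList ++ [Char.ofNat (48 + d)] ++ " ".toList
  else if (48 ≤ o ∧ o ≤ 57) ∨ "@*_#.".toList.contains c then
    " dtmf-".toList ++ [c] ++ " ".toList
  else []

def replaceDTMFStatic_alt (pattern : String) (language : String) : String × String :=
  let kept := pattern.toList.filter (fun c => !("(){} ".toList.contains c))
  let parts := kept.map (fun c => [' '] ++ dtmfToken c ++ [' '])
  (String.ofList parts.flatten, String.ofList kept)

-- ===== PRECONDITION & SPEC =====
def Spec_replaceDTMFStatic (pattern : String) (language : String) (out : String × String) : Prop := out = replaceDTMFStatic_alt pattern language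
instance (pattern : String) (language : String) (out : String × String) : Decidable (Spec_replaceDTMFStatic pattern language out) := by unfold Spec_replaceDTMFStatic; infer_instance

-- ===== CLAIM (what is proved, stated in full; the proofs are below) =====
def Claim_equal_replaceDTMFStatic : Prop := ∀ (pattern : String) (language : String), Dom_replaceDTMFStatic pattern language → Spec_replaceDTMFStatic pattern language (replaceDTMFStatic pattern language)

-- ===== LEMMAS AND PROOFS =====

-- replacing one character by the empty string is filtering it out
lemma replace_go_single (a : Char) : ∀ (fuel : Nat) (l acc : List Char), l.length ≤ fuel →
    PySem.Chars.replace.go [a] [] fuel l acc = acc.reverse ++ l.filter (· ≠ a) := by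
  intro fuel
  induction fuel with
  | zero =>
    intro l acc h
    have : l = [] := List.eq_nil_of_length_eq_zero (Nat.le_zero.mp h)
    subst this; simp [PySem.Chars.replace.go]
  | succ n ih =>
    intro l acc h
    cases l with
    | nil => simp [PySem.Chars.replace.go]
    | cons c t =>
      simp only [PySem.Chars.replace.go]
      have hp : List.isPrefixOf [a] (c :: t) = (a == c) := by simp [List.isPrefixOf]
      rw [hp]
      by_cases hc : a = c
      · subst hc
        rw [if_pos (by simp)]
        rw [ih _ _ (by simpa using Nat.le_of_succ_le_succ h)]
        simp [List.filter_cons]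
      · rw [show (a == c) = false by simp [hc]]
        simp only [Bool.false_eq_true, if_false]
        rw [ih _ _ (by simpa using Nat.le_of_succ_le_succ h)]
        simp [List.filter_cons, Ne.symm hc]

lemma replace_single (a : Char) (l : List Char) :
    PySem.Chars.replace l [a] [] = l.filter (· ≠ a) := by
  simp only [PySem.Chars.replace, List.isEmpty_cons, Bool.false_eq_true, if_false]
  exact replace_go_single a l.length l [] le_rfl

-- the segments produced by split(sep) for a one-character sep flatten to the chars ≠ sep
lemma splitOn_go_flatten (a : Char) : ∀ (fuel : Nat) (l cur : List Char) (acc : List (List Char)),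
    l.length ≤ fuel →
    (PySem.Chars.splitOn.go [a] fuel l cur acc).flatten
      = acc.reverse.flatten ++ cur.reverse ++ l.filter (· ≠ a) := by
  intro fuel
  induction fuel with
  | zero =>
    intro l cur acc h
    have : l = [] := List.eq_nil_of_length_eq_zero (Nat.le_zero.mp h)
    subst this; simp [PySem.Chars.splitOn.go]
  | succ n ih =>
    intro l cur acc h
    cases l with
    | nil => simp [PySem.Chars.splitOn.go]
    | cons c t =>
      simp only [PySem.Chars.splitOn.go]
      have hp : List.isPrefixOf [a] (c :: t) = (a == c) := by simp [List.isPrefixOf]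
      rw [hp]
      by_cases hc : a = c
      · subst hc
        rw [if_pos (by simp)]
        rw [ih _ _ _ (by simpa using Nat.le_of_succ_le_succ h)]
        simp [List.filter_cons]
      · rw [show (a == c) = false by simp [hc]]
        simp only [Bool.false_eq_true, if_false]
        rw [ih _ _ _ (by simpa using Nat.le_of_succ_le_succ h)]
        simp [List.filter_cons, Ne.symm hc]

lemma splitOn_flatten (a : Char) (l : List Char) :
    (PySem.Chars.splitOn l [a]).flatten = l.filter (· ≠ a) := by
  simp only [PySem.Chars.splitOn]
  rw [splitOn_go_flatten a (l.length + 1) l [] [] (Nat.le_succ _)]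
  simp

-- A's if-chain computes exactly B's arithmetic token
set_option maxRecDepth 8192 in
lemma checkDTMFNum_eq_token (c : Char) :
    checkDTMFNum c = dtmfToken c := by
  by_cases h1 : (97 ≤ c.toNat ∧ c.toNat ≤ 122) ∨ (48 ≤ c.toNat ∧ c.toNat ≤ 57)
  · -- a letter or a digit: pin c down to one of 36 literal characters and compute both sides
    have hd : c.toNat = 48 ∨ c.toNat = 49 ∨ c.toNat = 50 ∨ c.toNat = 51 ∨ c.toNat = 52 ∨
        c.toNat = 53 ∨ c.toNat = 54 ∨ c.toNat = 55 ∨ c.toNat = 56 ∨ c.toNat = 57 ∨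
        c.toNat = 97 ∨ c.toNat = 98 ∨ c.toNat = 99 ∨ c.toNat = 100 ∨ c.toNat = 101 ∨
        c.toNat = 102 ∨ c.toNat = 103 ∨ c.toNat = 104 ∨ c.toNat = 105 ∨ c.toNat = 106 ∨
        c.toNat = 107 ∨ c.toNat = 108 ∨ c.toNat = 109 ∨ c.toNat = 110 ∨ c.toNat = 111 ∨
        c.toNat = 112 ∨ c.toNat = 113 ∨ c.toNat = 114 ∨ c.toNat = 115 ∨ c.toNat = 116 ∨
        c.toNat = 117 ∨ c.toNat = 118 ∨ c.toNat = 119 ∨ c.toNat = 120 ∨ c.toNat = 121 ∨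
        c.toNat = 122 := by omega
    rcases hd with h|h|h|h|h|h|h|h|h|h|h|h|h|h|h|h|h|h|h|h|h|h|h|h|h|h|h|h|h|h|h|h|h|h|h|h <;>
      (rw [← Char.ofNat_toNat c, h]; decide)
  · by_cases h2 : c ∈ ['@', '*', '_', '#', '.']
    · fin_cases h2 <;> decide
    · -- everything else maps to '' on both sides
      have hnm : c ∉ ['a','b','c','d','e','f','g','h','i','j','k','l','m','n','o','p','q','r','s',
          't','u','v','w','x','y','z','0','1','2','3','4','5','6','7','8','9','@','*','_','#','.'] := by
        intro hm
        fin_cases hm <;> first | exact h1 (by decide) | exact h2 (by decide)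
      simp only [List.mem_cons, List.not_mem_nil, or_false, not_or] at hnm
      obtain ⟨g1,g2,g3,g4,g5,g6,g7,g8,g9,g10,g11,g12,g13,g14,g15,g16,g17,g18,g19,g20,g21,
        g22,g23,g24,g25,g26,g27,g28,g29,g30,g31,g32,g33,g34,g35,g36,g37,g38,g39,g40,g41⟩ := hnm
      have hA : checkDTMFNum c = [] := by
        simp [checkDTMFNum,
          g1,g2,g3,g4,g5,g6,g7,g8,g9,g10,g11,g12,g13,g14,g15,g16,g17,g18,g19,g20,g21,
          g22,g23,g24,g25,g26,g27,g28,g29,g30,g31,g32,g33,g34,g35,g36,g37,g38,g39,g40,g41]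
      have hB : dtmfToken c = [] := by
        have hsym : ("@*_#.".toList.contains c) = false := by
          simp [List.contains_eq_mem, g37, g38, g39, g40, g41, Ne.symm]
        simp only [dtmfToken, hsym, Bool.false_eq_true, or_false]
        rw [if_neg (fun hh => h1 (Or.inl hh)), if_neg (fun hh => h1 (Or.inr hh))]
      rw [hA, hB]

-- A's surviving characters (after stripping "(){}" and splitting away ' ') are B's filtered list
lemma chars_eq (pattern : String) :
    (PySem.Chars.splitOn
        (("(){}".toList).foldl (fun cp rChar => PySem.Chars.replace cp [rChar] []) pattern.toList)
        [' ']).flatten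
      = pattern.toList.filter (fun c => !("(){} ".toList.contains c)) := by
  show (PySem.Chars.splitOn
      (PySem.Chars.replace (PySem.Chars.replace (PySem.Chars.replace (PySem.Chars.replace
        pattern.toList ['('] []) [')'] []) ['{'] []) ['}'] []) [' ']).flatten = _
  rw [splitOn_flatten, replace_single, replace_single, replace_single, replace_single,
    List.filter_filter, List.filter_filter, List.filter_filter, List.filter_filter]
  apply List.filter_congr
  intro c _
  simp only [List.contains_cons, List.contains_nil, Bool.or_false, Bool.not_or, Bool.and_comm]
  simp [decide_not, Bool.and_comm]

-- ===== VERDICT (by name: the statement is the Claim_ definition above) =====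
theorem replaceDTMFStatic_spec : Claim_equal_replaceDTMFStatic := by
  intro pattern language _
  show _ = _
  unfold replaceDTMFStatic replaceDTMFStatic_alt
  simp only []
  rw [← List.foldl_flatten, chars_eq,
    PySem.List.foldl_prod_mk
      (f := fun (acc : List Char) locChar => acc ++ [' '] ++ checkDTMFNum locChar ++ [' '])
      (g := fun (acc : List Char) locChar => acc ++ [locChar])]
  congr 1
  · congr 1
    have : ∀ (l : List Char) (init : List Char),
        l.foldl (fun acc locChar => acc ++ [' '] ++ checkDTMFNum locChar ++ [' ']) init
          = init ++ (l.map (fun c => [' '] ++ dtmfToken c ++ [' '])).flatten := by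
      intro l
      induction l with
      | nil => simp
      | cons c t ih =>
        intro init
        rw [List.foldl_cons, ih, checkDTMFNum_eq_token c]
        simp
    simpa using this _ []
  · congr 1
    have : ∀ (l : List Char) (init : List Char),
        l.foldl (fun acc locChar => acc ++ [locChar]) init = init ++ l := by
      intro l
      induction l with
      | nil => simp
      | cons c t ih => intro init; simp [ih]
    simpa using this _ []
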